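-- pv_equiv track=rewrite | github.com/bc36/leetcode | lc_Python/lc2600_2699.py | findPrefixScore
-- ===== SOURCE A (Python) =====
-- import bisect, collections, functools, heapq, itertools, math, operator, string
-- from typing import List, Optional, Tuple
--
-- def findPrefixScore(nums: List[int]) -> List[int]:
--     mx = 0
--     n = len(nums)
--     cover = [0] * n
--     for i, v in enumerate(nums):
--         mx = max(mx, v)
--         cover[i] = v + mx
--     return list(itertools.accumulate(cover))
-- ===== SOURCE B (Python) =====
-- def findPrefixScore(nums):
--     # Different algorithm: prefix sums + run-length-encoded running max emitted
--     # as arithmetic ramps (multiplication per run), instead of per-element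
--     # cover[i]=v+mx followed by accumulate.
--     # prefix sums of nums
--     P = []
--     s = 0
--     for v in nums:
--         s += v
--         P.append(s)
--     # run-length encode the running-max sequence (seeded with 0)
--     runs = []  # entries [value, length]; values strictly increase across runs
--     cur = 0
--     for v in nums:
--         if v > cur:
--             cur = v
--         if runs and runs[-1][0] == cur:
--             runs[-1][1] += 1
--         else:
--             runs.append([cur, 1])
--     # running sums of the running max: one arithmetic ramp per run
--     M = []
--     base = 0
--     for val, length in runs:
--         M.extend(base + val * j for j in range(1, length + 1))
--         base += val * length
--     return [p + m for p, m in zip(P, M)]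
-- ===== Notes on version B (the rewrite author's own statement) =====
-- stated objective: alternative
-- what changed: Instead of A's per-element cover[i]=v+mx followed by itertools.accumulate, B computes prefix sums of nums, run-length encodes the running-max sequence, emits the running sum of the maxes as one arithmetic ramp (base + val*j) per run, and zips the two lists.
import Mathlib
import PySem

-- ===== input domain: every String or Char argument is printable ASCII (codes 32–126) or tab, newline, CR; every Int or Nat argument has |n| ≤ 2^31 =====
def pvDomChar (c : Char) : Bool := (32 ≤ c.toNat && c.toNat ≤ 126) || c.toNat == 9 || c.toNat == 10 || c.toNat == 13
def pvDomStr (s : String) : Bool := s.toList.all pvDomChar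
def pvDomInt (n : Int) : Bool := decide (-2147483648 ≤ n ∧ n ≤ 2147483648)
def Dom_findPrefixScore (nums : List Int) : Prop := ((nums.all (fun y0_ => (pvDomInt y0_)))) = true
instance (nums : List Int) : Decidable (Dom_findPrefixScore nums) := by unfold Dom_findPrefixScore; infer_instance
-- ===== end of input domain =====

-- B replaces A's per-element cover-then-accumulate pipeline by prefix sums plus a
-- run-length encoding of the running max emitted as arithmetic ramps; objective: alternative.

-- ===== PORT A =====
-- the 'for i, v in enumerate(nums)' loop: carries mx, fills cover in order
def pvBuildCover (mx : Int) : List Int → List Int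
  | [] => []
  | v :: rest => (v + max mx v) :: pvBuildCover (max mx v) rest

-- list(itertools.accumulate(cover)): running sums
def pvAccumulate (t : Int) : List Int → List Int
  | [] => []
  | c :: rest => (t + c) :: pvAccumulate (t + c) rest

def findPrefixScore (nums : List Int) : List Int :=
  pvAccumulate 0 (pvBuildCover 0 nums)

-- ===== PORT B =====
-- prefix-sum loop of Source B (P)
def pvPrefix (s : Int) : List Int → List Int
  | [] => []
  | v :: rest => (s + v) :: pvPrefix (s + v) rest

-- runs[-1][0] of Source B
def pvLastVal : List (Int × Int) → Option Int
  | [] => none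
  | [(a, _)] => some a
  | _ :: rest => pvLastVal rest

-- runs[-1][1] += 1 of Source B
def pvBumpLast : List (Int × Int) → List (Int × Int)
  | [] => []
  | [(a, k)] => [(a, k + 1)]
  | p :: rest => p :: pvBumpLast rest

-- the run-length-encoding loop of Source B (runs)
def pvRunsLoop (cur : Int) (runs : List (Int × Int)) : List Int → List (Int × Int)
  | [] => runs
  | v :: rest =>
    let c := if v > cur then v else cur
    if pvLastVal runs = some c then pvRunsLoop c (pvBumpLast runs) rest
    else pvRunsLoop c (runs ++ [(c, 1)]) rest

-- the ramp-emitting loop of Source B (M)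
def pvRamps (base : Int) : List (Int × Int) → List Int
  | [] => []
  | (val, len) :: rest =>
      (PySem.List.pyRange 1 (len + 1) 1).map (fun j => base + val * j)
        ++ pvRamps (base + val * len) rest

def findPrefixScore_alt (nums : List Int) : List Int :=
  List.zipWith (· + ·) (pvPrefix 0 nums) (pvRamps 0 (pvRunsLoop 0 [] nums))

-- ===== PRECONDITION & SPEC =====
def Spec_findPrefixScore (nums : List Int) (out : List Int) : Prop := out = findPrefixScore_alt nums
instance (nums : List Int) (out : List Int) : Decidable (Spec_findPrefixScore nums out) := by unfold Spec_findPrefixScore; infer_instance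

-- ===== CLAIM (what is proved, stated in full; the proofs are below) =====
def Claim_equal_findPrefixScore : Prop := ∀ (nums : List Int), Dom_findPrefixScore nums → Spec_findPrefixScore nums (findPrefixScore nums)

-- ===== LEMMAS AND PROOFS =====

-- reference: the running-max sequence
def pvRunMax (mx : Int) : List Int → List Int
  | [] => []
  | v :: rest => (max mx v) :: pvRunMax (max mx v) rest

-- total weight of a run list
def pvWeight : List (Int × Int) → Int
  | [] => 0
  | (a, k) :: rest => a * k + pvWeight rest

-- all run lengths nonnegative
def pvWF (runs : List (Int × Int)) : Prop := ∀ p ∈ runs, 0 ≤ p.2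

theorem pvRamps_cons (base a k : Int) (t : List (Int × Int)) :
    pvRamps base ((a, k) :: t)
      = (PySem.List.pyRange 1 (k + 1) 1).map (fun j => base + a * j)
          ++ pvRamps (base + a * k) t := rfl

theorem pvWeight_append (r1 r2 : List (Int × Int)) :
    pvWeight (r1 ++ r2) = pvWeight r1 + pvWeight r2 := by
  induction r1 with
  | nil => simp [pvWeight]
  | cons p r ih =>
    obtain ⟨a, k⟩ := p
    simp only [List.cons_append, pvWeight, ih]
    ring

theorem pvBuildCover_zip (l : List Int) : ∀ mx,
    pvBuildCover mx l = List.zipWith (· + ·) l (pvRunMax mx l) := by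
  induction l with
  | nil => intro mx; rfl
  | cons v rest ih => intro mx; simp [pvBuildCover, pvRunMax, ih]

theorem pvAccumulate_zip (a : List Int) : ∀ (b : List Int) (t1 t2 : Int),
    pvAccumulate (t1 + t2) (List.zipWith (· + ·) a b)
      = List.zipWith (· + ·) (pvPrefix t1 a) (pvAccumulate t2 b) := by
  induction a with
  | nil => intro b t1 t2; simp [pvAccumulate, pvPrefix]
  | cons x xs ih =>
    intro b t1 t2
    cases b with
    | nil => simp [pvAccumulate, pvPrefix]
    | cons y ys =>
      simp only [List.zipWith, pvAccumulate, pvPrefix]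
      have h : t1 + t2 + (x + y) = (t1 + x) + (t2 + y) := by ring
      rw [h, ih ys (t1 + x) (t2 + y)]

theorem pvRamps_append (r1 : List (Int × Int)) : ∀ (r2 : List (Int × Int)) (base : Int),
    pvRamps base (r1 ++ r2) = pvRamps base r1 ++ pvRamps (base + pvWeight r1) r2 := by
  induction r1 with
  | nil => intro r2 base; simp [pvRamps, pvWeight]
  | cons p rest ih =>
    intro r2 base
    obtain ⟨a, k⟩ := p
    simp only [List.cons_append, pvRamps_cons, pvWeight, ih, List.append_assoc]
    ring_nf

theorem pvRamps_single (c base : Int) : pvRamps base [(c, 1)] = [base + c] := by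
  have h1 : PySem.List.pyRange 1 (1 + 1) 1 = [1] := by decide
  rw [pvRamps_cons, h1]
  simp [pvRamps]

theorem pvRamps_bump (runs : List (Int × Int)) : ∀ (base c : Int),
    pvLastVal runs = some c → pvWF runs →
    pvRamps base (pvBumpLast runs) = pvRamps base runs ++ [base + pvWeight runs + c] := by
  induction runs with
  | nil => intro base c h _; simp [pvLastVal] at h
  | cons p rest ih =>
    intro base c h hwf
    obtain ⟨a, k⟩ := p
    cases rest with
    | nil =>
      simp only [pvLastVal, Option.some.injEq] at h
      subst h
      have hk : 0 ≤ k := hwf (a, k) (by simp)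
      have hr : PySem.List.pyRange 1 (k + 1 + 1) 1
          = PySem.List.pyRange 1 (k + 1) 1 ++ [k + 1] :=
        PySem.List.pyRange_one_succ_right (by omega)
      have hb : pvBumpLast [(a, k)] = [(a, k + 1)] := rfl
      rw [hb, pvRamps_cons, pvRamps_cons, hr, List.map_append]
      simp only [pvRamps, pvWeight, List.map, List.append_nil]
      congr 2
      ring
    | cons q rest' =>
      have hlast : pvLastVal ((a, k) :: q :: rest') = pvLastVal (q :: rest') := rfl
      have hbump : pvBumpLast ((a, k) :: q :: rest') = (a, k) :: pvBumpLast (q :: rest') := rfl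
      have hwf' : pvWF (q :: rest') := fun p hp => hwf p (by simp [hp])
      rw [hbump, pvRamps_cons, pvRamps_cons,
          ih (base + a * k) c (hlast ▸ h) hwf', List.append_assoc]
      simp only [pvWeight]
      congr 3
      ring

theorem pvWeight_bump (runs : List (Int × Int)) : ∀ c, pvLastVal runs = some c →
    pvWeight (pvBumpLast runs) = pvWeight runs + c := by
  induction runs with
  | nil => intro c h; simp [pvLastVal] at h
  | cons p rest ih =>
    intro c h
    obtain ⟨a, k⟩ := p
    cases rest with
    | nil =>
      simp only [pvLastVal, Option.some.injEq] at h
      subst h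
      have hb : pvBumpLast [(a, k)] = [(a, k + 1)] := rfl
      rw [hb]
      simp only [pvWeight]
      ring
    | cons q rest' =>
      have hb : pvBumpLast ((a, k) :: q :: rest') = (a, k) :: pvBumpLast (q :: rest') := rfl
      rw [hb]
      simp only [pvWeight, ih c h]
      ring

theorem pvWF_bump (runs : List (Int × Int)) (h : pvWF runs) : pvWF (pvBumpLast runs) := by
  induction runs with
  | nil => exact h
  | cons p rest ih =>
    obtain ⟨a, k⟩ := p
    cases rest with
    | nil =>
      intro q hq
      have hb : pvBumpLast [(a, k)] = [(a, k + 1)] := rfl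
      rw [hb] at hq
      simp only [List.mem_singleton] at hq
      subst hq
      have := h (a, k) (by simp)
      simp only at this ⊢
      omega
    | cons q rest' =>
      intro r hr
      have hb : pvBumpLast ((a, k) :: q :: rest') = (a, k) :: pvBumpLast (q :: rest') := rfl
      rw [hb] at hr
      rcases List.mem_cons.mp hr with h1 | h1
      · subst h1; exact h (a, k) (by simp)
      · exact ih (fun p hp => h p (by simp [hp])) r h1

-- main invariant: the runs loop's ramps extend the accumulate of the running max
theorem pvRuns_spec (l : List Int) : ∀ (cur : Int) (runs : List (Int × Int)) (base : Int),
    pvWF runs →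
    pvRamps base (pvRunsLoop cur runs l)
      = pvRamps base runs ++ pvAccumulate (base + pvWeight runs) (pvRunMax cur l) := by
  induction l with
  | nil => intro cur runs base _; simp [pvRunsLoop, pvRunMax, pvAccumulate]
  | cons v rest ih =>
    intro cur runs base hwf
    have hmax : (if v > cur then v else cur) = max cur v := by
      rcases le_or_gt v cur with h | h
      · simp [max_eq_left h, not_lt.mpr h]
      · simp [max_eq_right h.le, h]
    simp only [pvRunsLoop, hmax, pvRunMax, pvAccumulate]
    by_cases hlast : pvLastVal runs = some (max cur v)
    · rw [if_pos hlast, ih (max cur v) (pvBumpLast runs) base (pvWF_bump runs hwf)]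
      rw [pvRamps_bump runs base (max cur v) hlast hwf,
          pvWeight_bump runs (max cur v) hlast]
      simp only [List.append_assoc, List.singleton_append]
      have h2 : base + (pvWeight runs + max cur v) = base + pvWeight runs + max cur v := by ring
      rw [h2]
    · rw [if_neg hlast]
      have hwf' : pvWF (runs ++ [(max cur v, 1)]) := by
        intro p hp
        rcases List.mem_append.mp hp with h1 | h1
        · exact hwf p h1
        · simp only [List.mem_singleton] at h1; subst h1; norm_num
      rw [ih (max cur v) (runs ++ [(max cur v, 1)]) base hwf']
      rw [pvRamps_append runs [(max cur v, 1)] base, pvRamps_single, pvWeight_append]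
      simp only [List.append_assoc, List.singleton_append]
      have h2 : base + (pvWeight runs + pvWeight [(max cur v, 1)])
          = base + pvWeight runs + max cur v := by simp [pvWeight]; ring
      rw [h2]

-- ===== VERDICT (by name: the statement is the Claim_ definition above) =====
theorem findPrefixScore_spec : Claim_equal_findPrefixScore := by
  intro nums _
  unfold Spec_findPrefixScore findPrefixScore findPrefixScore_alt
  rw [pvBuildCover_zip nums 0]
  have h1 := pvAccumulate_zip nums (pvRunMax 0 nums) 0 0
  have h2 := pvRuns_spec nums 0 [] 0 (by intro p hp; simp at hp)
  simp only [zero_add] at h1 h2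
  simp only [pvRamps, pvWeight, List.nil_append] at h2
  rw [h1, h2]
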